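-- pv_equiv track=rewrite | github.com/Vinayparmar2264/HackWithInfy_LNCT_26_DSA_TOP_questions | Maximum_Non_Adjacent_same_dish.py | func
-- ===== SOURCE A (Python) =====
-- def func(nums, n, val):
--     if n < 0:
--         return 0
--
--     if n == 0:
--         if nums[n] == val:
--             return 1
--         return 0
--
--     pick = 0
--
--     if nums[n] == val:
--         pick = 1 + func(nums, n-2, val)
--
--     not_pick = func(nums, n-1, val)
--
--     return max(pick, not_pick)
--
-- nums = [1,2,2,1,2,1,1,1,1,3,3,]
-- ===== SOURCE B (Python) =====
-- def func(nums, n, val):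
--     # bottom-up DP (house-robber style), O(n) instead of A's exponential recursion
--     prev2 = prev1 = 0
--     for i in range(n + 1):
--         cur = max(prev1, (1 if nums[i] == val else 0) + prev2)
--         prev2, prev1 = prev1, cur
--     return prev1
-- ===== Notes on version B (the rewrite author's own statement) =====
-- stated objective: faster
-- what changed: Replaces A's exponential branching recursion with a bottom-up two-variable DP loop over indices 0..n.
import Mathlib
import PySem

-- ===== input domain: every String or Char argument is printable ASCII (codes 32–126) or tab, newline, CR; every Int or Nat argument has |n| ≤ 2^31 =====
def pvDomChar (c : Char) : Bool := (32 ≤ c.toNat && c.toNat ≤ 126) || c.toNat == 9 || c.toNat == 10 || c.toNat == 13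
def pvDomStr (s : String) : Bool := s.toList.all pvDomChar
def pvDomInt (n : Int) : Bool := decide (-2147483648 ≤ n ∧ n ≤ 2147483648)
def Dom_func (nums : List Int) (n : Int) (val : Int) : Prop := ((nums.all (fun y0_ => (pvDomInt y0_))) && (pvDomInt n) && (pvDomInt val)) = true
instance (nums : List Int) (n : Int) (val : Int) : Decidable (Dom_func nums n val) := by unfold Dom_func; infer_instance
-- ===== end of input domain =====

-- B replaces A's exponential recursion with a bottom-up two-variable DP loop (asymptotically faster).

-- ===== PORT A =====
-- literal port of A's branching recursion; nums[n] → pyGetD (in range inside Pre_)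
def func (nums : List Int) (n : Int) (val : Int) : Int :=
  if n < 0 then 0
  else if n = 0 then
    (if PySem.List.pyGetD nums n 0 = val then 1 else 0)
  else
    let pick := if PySem.List.pyGetD nums n 0 = val then 1 + func nums (n - 2) val else 0
    let not_pick := func nums (n - 1) val
    max pick not_pick
termination_by n.toNat
decreasing_by all_goals omega

-- ===== PORT B =====
-- literal port of Source B: fold over range(n+1) carrying (prev2, prev1)
def func_alt (nums : List Int) (n : Int) (val : Int) : Int :=
  ((PySem.List.pyRange 0 (n + 1) 1).foldl
    (fun (st : Int × Int) i =>
      (st.2, max st.2 ((if PySem.List.pyGetD nums i 0 = val then 1 else 0) + st.1)))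
    (0, 0)).2

-- ===== PRECONDITION & SPEC =====
-- Pre_ excludes exactly the inputs where Python A raises IndexError: nums[n] with n ≥ len(nums)
def Pre_func (nums : List Int) (n : Int) (val : Int) : Prop := n < (nums.length : Int)
instance (nums : List Int) (n : Int) (val : Int) : Decidable (Pre_func nums n val) := by unfold Pre_func; infer_instance
def pvWitness_func : List Int × Int × Int := ([1, 2, 1], 2, 1)

def Spec_func (nums : List Int) (n : Int) (val : Int) (out : Int) : Prop := out = func_alt nums n val
instance (nums : List Int) (n : Int) (val : Int) (out : Int) : Decidable (Spec_func nums n val out) := by unfold Spec_func; infer_instance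

-- ===== CLAIM (what is proved, stated in full; the proofs are below) =====
def Claim_equal_func : Prop := ∀ (nums : List Int) (n : Int) (val : Int), Dom_func nums n val → Pre_func nums n val → Spec_func nums n val (func nums n val)

-- ===== LEMMAS AND PROOFS =====

theorem func_neg (nums : List Int) (n : Int) (val : Int) (h : n < 0) : func nums n val = 0 := by
  conv_lhs => rw [func]
  simp [h]

theorem func_zero (nums : List Int) (val : Int) :
    func nums 0 val = (if PySem.List.pyGetD nums 0 0 = val then 1 else 0) := by
  conv_lhs => rw [func]
  norm_num

theorem func_pos (nums : List Int) (n : Int) (val : Int) (h : 0 < n) :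
    func nums n val =
      max (if PySem.List.pyGetD nums n 0 = val then 1 + func nums (n - 2) val else 0)
        (func nums (n - 1) val) := by
  conv_lhs => rw [func]
  rw [if_neg (by omega), if_neg (by omega)]

theorem func_nonneg (nums : List Int) (n : Int) (val : Int) : 0 ≤ func nums n val := by
  induction hn : n.toNat using Nat.strong_induction_on generalizing n with
  | _ k ih =>
    rcases lt_trichotomy n 0 with h | h | h
    · rw [func_neg nums n val h]
    · subst h; rw [func_zero]; split <;> norm_num
    · rw [func_pos nums n val h]
      refine le_trans (ih (n - 1).toNat (by omega) (n - 1) rfl) ?_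
      exact le_max_right _ _

theorem func_step_le (nums : List Int) (n : Int) (val : Int) :
    func nums (n - 1) val ≤ func nums n val := by
  rcases lt_trichotomy n 0 with h | h | h
  · rw [func_neg nums n val h, func_neg nums (n - 1) val (by omega)]
  · subst h
    rw [func_neg nums (0 - 1) val (by omega), func_zero]
    split <;> norm_num
  · rw [func_pos nums n val h]
    exact le_max_right _ _

theorem func_rec (nums : List Int) (val : Int) (k : Int) (hk : 0 ≤ k) :
    func nums k val =
      max (func nums (k - 1) val)
        ((if PySem.List.pyGetD nums k 0 = val then 1 else 0) + func nums (k - 2) val) := by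
  rcases eq_or_lt_of_le hk with h0 | hpos
  · -- k = 0
    subst h0
    rw [func_zero, func_neg nums (0 - 1) val (by omega), func_neg nums (0 - 2) val (by omega)]
    split <;> norm_num
  · rw [func_pos nums k val hpos]
    split
    · omega
    · -- pick = 0; RHS has c = 0
      have h2 : func nums (k - 2) val ≤ func nums (k - 1) val := by
        have := func_step_le nums (k - 1) val
        simpa [sub_sub] using this
      have h0 : 0 ≤ func nums (k - 1) val := func_nonneg nums (k - 1) val
      simp only [max_def]
      split <;> split <;> omega

theorem func_alt_fold (nums : List Int) (val : Int) (k : Nat) :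
    ((PySem.List.pyRange 0 (k : Int) 1).foldl
      (fun (st : Int × Int) i =>
        (st.2, max st.2 ((if PySem.List.pyGetD nums i 0 = val then 1 else 0) + st.1)))
      (0, 0))
    = (func nums ((k : Int) - 2) val, func nums ((k : Int) - 1) val) := by
  induction k with
  | zero =>
    rw [PySem.List.pyRange_one_eq_nil (by norm_num)]
    simp only [List.foldl_nil]
    rw [func_neg nums ((0:Nat) - 2) val (by norm_num), func_neg nums ((0:Nat) - 1) val (by norm_num)]
  | succ m ih =>
    have hsplit : (PySem.List.pyRange 0 ((m : Int) + 1) 1)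
        = PySem.List.pyRange 0 (m : Int) 1 ++ [(m : Int)] :=
      PySem.List.pyRange_one_succ_right (by positivity)
    push_cast
    rw [hsplit, List.foldl_append, ih]
    simp only [List.foldl_cons, List.foldl_nil]
    have := func_rec nums val (m : Int) (by positivity)
    rw [Prod.mk.injEq]
    refine ⟨by congr 1; omega, ?_⟩
    rw [show (m : Int) + 1 - 1 = (m : Int) by omega, this]

-- ===== VERDICT (by name: the statement is the Claim_ definition above) =====
theorem func_spec : Claim_equal_func := by
  intro nums n val _ _
  unfold Spec_func func_alt
  by_cases hn : n < 0
  · rw [PySem.List.pyRange_one_eq_nil (by omega)]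
    simp only [List.foldl_nil]
    rw [func_neg nums n val hn]
  · have hk : n + 1 = ((n.toNat + 1 : Nat) : Int) := by omega
    rw [hk, func_alt_fold]
    have : ((n.toNat + 1 : Nat) : Int) - 1 = n := by omega
    rw [this]
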